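-- pv_equiv track=rewrite | github.com/costantinoai/alma-library-manager | src/alma/api/routes/insights.py | _aggregate_openalex_usage
-- ===== SOURCE A (Python) =====
-- from typing import Any
--
-- def _aggregate_openalex_usage(operation_results: list[dict[str, Any]]) -> dict[str, Any]:
--     summary = {
--         "refreshes": 0,
--         "request_count": 0,
--         "retry_count": 0,
--         "rate_limited_events": 0,
--         "calls_saved_by_cache": 0,
--         "credits_used": 0,
--         "credits_remaining": None,
--     }
--     for entry in operation_results:
--         source_diagnostics = entry.get("source_diagnostics") or {}
--         openalex = source_diagnostics.get("openalex") if isinstance(source_diagnostics, dict) else None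
--         if not isinstance(openalex, dict):
--             continue
--         summary["refreshes"] += 1
--         summary["request_count"] += int(openalex.get("request_count") or 0)
--         summary["retry_count"] += int(openalex.get("retry_count") or 0)
--         summary["rate_limited_events"] += int(openalex.get("rate_limited_events") or 0)
--         summary["calls_saved_by_cache"] += int(openalex.get("calls_saved_by_cache") or 0)
--         summary["credits_used"] += int(openalex.get("credits_used") or 0)
--         credits_remaining = openalex.get("credits_remaining")
--         if credits_remaining is not None:
--             summary["credits_remaining"] = credits_remaining
--     return summary
-- ===== SOURCE B (Python) =====
-- def _aggregate_openalex_usage(operation_results):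
--     valid = [ox for ox in (
--                  (entry.get("source_diagnostics") or {}).get("openalex")
--                  for entry in operation_results)
--              if isinstance(ox, dict)]
--
--     def total(field):
--         return sum(int(ox.get(field) or 0) for ox in valid)
--
--     credits_remaining = next(
--         (ox.get("credits_remaining") for ox in reversed(valid)
--          if ox.get("credits_remaining") is not None),
--         None)
--
--     return {
--         "refreshes": len(valid),
--         "request_count": total("request_count"),
--         "retry_count": total("retry_count"),
--         "rate_limited_events": total("rate_limited_events"),
--         "calls_saved_by_cache": total("calls_saved_by_cache"),
--         "credits_used": total("credits_used"),
--         "credits_remaining": credits_remaining,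
--     }
-- ===== Notes on version B (the rewrite author's own statement) =====
-- stated objective: simpler
-- what changed: Replaces A's single loop mutating a seven-field summary dict with a filter-then-aggregate decomposition: build the list of valid openalex dicts once, take its length for refreshes, sum each numeric field with its own generator, and find credits_remaining by a back-to-front scan for the first non-None value.
import Mathlib
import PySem

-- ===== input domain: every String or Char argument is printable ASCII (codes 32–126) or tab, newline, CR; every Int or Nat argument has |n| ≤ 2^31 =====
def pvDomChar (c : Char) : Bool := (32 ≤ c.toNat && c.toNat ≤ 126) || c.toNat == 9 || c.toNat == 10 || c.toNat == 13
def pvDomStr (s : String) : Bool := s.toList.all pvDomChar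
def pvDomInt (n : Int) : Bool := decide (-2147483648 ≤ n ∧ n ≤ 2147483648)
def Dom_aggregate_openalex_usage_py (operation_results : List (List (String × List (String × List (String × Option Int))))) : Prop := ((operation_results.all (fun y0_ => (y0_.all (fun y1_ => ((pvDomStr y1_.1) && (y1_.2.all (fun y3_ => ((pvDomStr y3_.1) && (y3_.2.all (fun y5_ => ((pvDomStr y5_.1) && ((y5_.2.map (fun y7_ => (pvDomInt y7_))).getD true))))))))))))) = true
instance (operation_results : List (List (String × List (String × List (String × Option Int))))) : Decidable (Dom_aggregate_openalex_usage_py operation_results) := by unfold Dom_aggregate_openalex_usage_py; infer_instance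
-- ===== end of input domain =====

-- B replaces A's single mutating-summary loop by a filter-then-aggregate decomposition (same cost, not faster):
-- build the valid openalex list once, length/per-field sums over it, credits_remaining by a reversed scan.

-- ===== PORT A =====
-- shared dict-lookup helper: Python d.get(k) on an assoc-list dict (last value wins on duplicate keys, as in Python)
def pvGet {α : Type} (d : List (String × α)) (k : String) : Option α :=
  (PySem.Dict.ofList d).get? k

-- int(openalex.get(k) or 0): missing key, None value or 0 all give 0
def pvField (ox : List (String × Option Int)) (k : String) : Int :=
  match pvGet ox k with
  | some (some v) => v
  | _ => 0

-- one iteration of A's loop over the 7-component summary state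
def aggStep (s : Int × Int × Int × Int × Int × Int × Option Int)
    (entry : List (String × List (String × List (String × Option Int)))) :
    Int × Int × Int × Int × Int × Int × Option Int :=
  let sd := (pvGet entry "source_diagnostics").getD []    -- entry.get(...) or {}
  match pvGet sd "openalex" with                           -- not a dict ⇔ missing: continue
  | none => s
  | some ox =>
    match s with
    | (r, rc, ry, rl, cs, cu, cr) =>
      let cr' := match (pvGet ox "credits_remaining").join with
                 | some v => some v
                 | none => cr
      (r + 1, rc + pvField ox "request_count", ry + pvField ox "retry_count",
       rl + pvField ox "rate_limited_events", cs + pvField ox "calls_saved_by_cache",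
       cu + pvField ox "credits_used", cr')

def aggregate_openalex_usage_py (operation_results : List (List (String × List (String × List (String × Option Int))))) : List (String × Option Int) :=
  let s := operation_results.foldl aggStep (0, 0, 0, 0, 0, 0, none)
  [("refreshes", some s.1), ("request_count", some s.2.1), ("retry_count", some s.2.2.1),
   ("rate_limited_events", some s.2.2.2.1), ("calls_saved_by_cache", some s.2.2.2.2.1),
   ("credits_used", some s.2.2.2.2.2.1), ("credits_remaining", s.2.2.2.2.2.2)]

-- ===== PORT B =====
-- the openalex dicts surviving the guards
def pvValid (operation_results : List (List (String × List (String × List (String × Option Int))))) :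
    List (List (String × Option Int)) :=
  operation_results.filterMap
    (fun entry => pvGet ((pvGet entry "source_diagnostics").getD []) "openalex")

def aggregate_openalex_usage_py_alt (operation_results : List (List (String × List (String × List (String × Option Int))))) : List (String × Option Int) :=
  let valid := pvValid operation_results
  let total := fun (k : String) => (valid.map (fun ox => pvField ox k)).sum
  let credits := valid.reverse.findSome? (fun ox => (pvGet ox "credits_remaining").join)
  [("refreshes", some (valid.length : Int)),
   ("request_count", some (total "request_count")),
   ("retry_count", some (total "retry_count")),
   ("rate_limited_events", some (total "rate_limited_events")),
   ("calls_saved_by_cache", some (total "calls_saved_by_cache")),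
   ("credits_used", some (total "credits_used")),
   ("credits_remaining", credits)]

-- ===== PRECONDITION & SPEC =====
def Spec_aggregate_openalex_usage_py (operation_results : List (List (String × List (String × List (String × Option Int))))) (out : List (String × Option Int)) : Prop := out = aggregate_openalex_usage_py_alt operation_results
instance (operation_results : List (List (String × List (String × List (String × Option Int))))) (out : List (String × Option Int)) : Decidable (Spec_aggregate_openalex_usage_py operation_results out) := by unfold Spec_aggregate_openalex_usage_py; infer_instance

-- ===== CLAIM (what is proved, stated in full; the proofs are below) =====
def Claim_equal_aggregate_openalex_usage_py : Prop := ∀ (operation_results : List (List (String × List (String × List (String × Option Int))))), Dom_aggregate_openalex_usage_py operation_results → Spec_aggregate_openalex_usage_py operation_results (aggregate_openalex_usage_py operation_results)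

-- ===== LEMMAS AND PROOFS =====

lemma agg_fold_eq (ors : List (List (String × List (String × List (String × Option Int)))))
    (r rc ry rl cs cu : Int) (cr : Option Int) :
    ors.foldl aggStep (r, rc, ry, rl, cs, cu, cr) =
      (r + (pvValid ors).length,
       rc + ((pvValid ors).map (fun ox => pvField ox "request_count")).sum,
       ry + ((pvValid ors).map (fun ox => pvField ox "retry_count")).sum,
       rl + ((pvValid ors).map (fun ox => pvField ox "rate_limited_events")).sum,
       cs + ((pvValid ors).map (fun ox => pvField ox "calls_saved_by_cache")).sum,
       cu + ((pvValid ors).map (fun ox => pvField ox "credits_used")).sum,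
       match (pvValid ors).reverse.findSome? (fun ox => (pvGet ox "credits_remaining").join) with
       | some v => some v
       | none => cr) := by
  induction ors generalizing r rc ry rl cs cu cr with
  | nil => simp [pvValid]
  | cons e t ih =>
    simp only [List.foldl_cons, aggStep, pvValid, List.filterMap_cons]
    cases h : pvGet ((pvGet e "source_diagnostics").getD []) "openalex" with
    | none => simpa [pvValid] using ih r rc ry rl cs cu cr
    | some ox =>
      simp only []
      cases hcr : (pvGet ox "credits_remaining").join with
      | none =>
        rw [ih]
        simp only [pvValid, List.reverse_cons, List.findSome?_append, List.findSome?_cons, hcr,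
          List.length_cons, List.map_cons, List.sum_cons]
        cases (t.filterMap (fun entry => pvGet ((pvGet entry "source_diagnostics").getD []) "openalex")).reverse.findSome?
            (fun ox => (pvGet ox "credits_remaining").join) <;>
          simp [Prod.ext_iff] <;> omega
      | some v =>
        rw [ih]
        simp only [pvValid, List.reverse_cons, List.findSome?_append, List.findSome?_cons, hcr,
          List.length_cons, List.map_cons, List.sum_cons]
        cases (t.filterMap (fun entry => pvGet ((pvGet entry "source_diagnostics").getD []) "openalex")).reverse.findSome?
            (fun ox => (pvGet ox "credits_remaining").join) <;>
          simp [Prod.ext_iff] <;> omega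

-- ===== VERDICT (by name: the statement is the Claim_ definition above) =====
theorem aggregate_openalex_usage_py_spec : Claim_equal_aggregate_openalex_usage_py := by
  intro ors _
  unfold Spec_aggregate_openalex_usage_py aggregate_openalex_usage_py aggregate_openalex_usage_py_alt
  rw [agg_fold_eq]
  simp only [zero_add]
  cases (pvValid ors).reverse.findSome? (fun ox => (pvGet ox "credits_remaining").join) <;> simp
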